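-- pv_equiv track=rewrite | github.com/Ruobin-hkbu/algorithm-culture | ad_copy_assistant.py | _sanitize_audience_description
-- ===== SOURCE A (Python) =====
-- def _sanitize_audience_description(audience: str) -> str:
--     """Remove potentially problematic assumptions from audience descriptions"""
--     # Replace demographic assumptions with inclusive language
--     replacements = {
--         'busy moms': 'busy parents and caregivers',
--         'working mothers': 'working parents',
--         'elderly': 'older adults',
--         'disabled people': 'people with disabilities',
--         'normal people': 'most people',
--         'average consumers': 'everyday consumers'
--     }
--
--     sanitized = audience.lower()
--     for problematic, inclusive in replacements.items():
--         sanitized = sanitized.replace(problematic, inclusive)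
--
--     return sanitized
-- ===== SOURCE B (Python) =====
-- def _sanitize_audience_description(audience: str) -> str:
--     """Remove potentially problematic assumptions from audience descriptions"""
--     pairs = (
--         ('busy moms', 'busy parents and caregivers'),
--         ('working mothers', 'working parents'),
--         ('elderly', 'older adults'),
--         ('disabled people', 'people with disabilities'),
--         ('normal people', 'most people'),
--         ('average consumers', 'everyday consumers'),
--     )
--
--     def apply_from(s, i):
--         if i == len(pairs):
--             return s
--         phrase, inclusive = pairs[i]
--         return apply_from(inclusive.join(s.split(phrase)), i + 1)
--
--     return apply_from(audience.lower(), 0)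
-- ===== Notes on version B (the rewrite author's own statement) =====
-- stated objective: alternative
-- what changed: Replaces the imperative loop of six str.replace passes with a recursion over the phrase list in which each pass is expressed as split-on-phrase followed by join-with-replacement (sequential pass order is kept deliberately: it is observable, since earlier replacements can create later phrases).
import Mathlib
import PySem

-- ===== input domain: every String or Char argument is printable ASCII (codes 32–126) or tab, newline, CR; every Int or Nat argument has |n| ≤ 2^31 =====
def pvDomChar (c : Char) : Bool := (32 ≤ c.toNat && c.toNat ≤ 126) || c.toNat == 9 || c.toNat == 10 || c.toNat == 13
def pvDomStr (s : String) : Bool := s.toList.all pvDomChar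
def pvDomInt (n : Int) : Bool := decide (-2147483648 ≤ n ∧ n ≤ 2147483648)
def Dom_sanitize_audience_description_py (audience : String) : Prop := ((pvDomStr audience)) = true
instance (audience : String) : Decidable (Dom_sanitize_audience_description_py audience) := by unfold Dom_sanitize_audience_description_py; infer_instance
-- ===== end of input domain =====

-- B replaces the loop of six str.replace passes with a recursion over the phrase list,
-- each pass expressed as split-on-phrase + join-with-replacement (alternative decomposition, same cost).


-- ===== PORT A =====
-- the 'replacements' dict, in insertion order (only .items() iteration is used)
def saReplacements : List (String × String) :=
  [("busy moms", "busy parents and caregivers"),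
   ("working mothers", "working parents"),
   ("elderly", "older adults"),
   ("disabled people", "people with disabilities"),
   ("normal people", "most people"),
   ("average consumers", "everyday consumers")]

-- 'sanitized = audience.lower(); for problematic, inclusive in replacements.items(): sanitized = sanitized.replace(...)'
def sanitize_audience_description_py (audience : String) : String :=
  saReplacements.foldl (fun sanitized p => PySem.Str.replace sanitized p.1 p.2)
    (PySem.Str.lower audience)

-- ===== PORT B =====
def sbPairs : List (List Char × List Char) :=
  [("busy moms".toList, "busy parents and caregivers".toList),
   ("working mothers".toList, "working parents".toList),
   ("elderly".toList, "older adults".toList),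
   ("disabled people".toList, "people with disabilities".toList),
   ("normal people".toList, "most people".toList),
   ("average consumers".toList, "everyday consumers".toList)]

-- 'apply_from(s, i)': recursion over the phrase list; each step is inclusive.join(s.split(phrase))
def sbApplyFrom : List (List Char × List Char) → List Char → List Char
  | [], s => s
  | (phrase, inclusive) :: rest, s =>
      sbApplyFrom rest (PySem.Chars.join inclusive (PySem.Chars.splitOn s phrase))

def sanitize_audience_description_py_alt (audience : String) : String :=
  String.ofList (sbApplyFrom sbPairs (PySem.Chars.lower audience.toList))

-- ===== PRECONDITION & SPEC =====
def Spec_sanitize_audience_description_py (audience : String) (out : String) : Prop := out = sanitize_audience_description_py_alt audience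
instance (audience : String) (out : String) : Decidable (Spec_sanitize_audience_description_py audience out) := by unfold Spec_sanitize_audience_description_py; infer_instance

-- ===== CLAIM (what is proved, stated in full; the proofs are below) =====
def Claim_equal_sanitize_audience_description_py : Prop := ∀ (audience : String), Dom_sanitize_audience_description_py audience → Spec_sanitize_audience_description_py audience (sanitize_audience_description_py audience)

-- ===== LEMMAS AND PROOFS =====

-- clean equation lemmas for the two PySem loop bodies
theorem repGo_zero (old new l acc : List Char) :
    PySem.Chars.replace.go old new 0 l acc = acc.reverse ++ l := by
  rw [PySem.Chars.replace.go]

theorem repGo_nil (old new acc : List Char) (n : Nat) :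
    PySem.Chars.replace.go old new (n + 1) [] acc = acc.reverse := by
  rw [PySem.Chars.replace.go]; simp

theorem repGo_cons (old new acc t : List Char) (c : Char) (n : Nat) :
    PySem.Chars.replace.go old new (n + 1) (c :: t) acc
      = if old.isPrefixOf (c :: t)
        then PySem.Chars.replace.go old new n (List.drop old.length (c :: t)) (new.reverse ++ acc)
        else PySem.Chars.replace.go old new n t (c :: acc) := by
  rw [PySem.Chars.replace.go]

theorem splitGo_zero (sep l cur : List Char) (accs : List (List Char)) :
    PySem.Chars.splitOn.go sep 0 l cur accs = ((cur.reverse ++ l) :: accs).reverse := by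
  rw [PySem.Chars.splitOn.go]

theorem splitGo_nil (sep cur : List Char) (accs : List (List Char)) (n : Nat) :
    PySem.Chars.splitOn.go sep (n + 1) [] cur accs = (cur.reverse :: accs).reverse := by
  rw [PySem.Chars.splitOn.go]; simp

theorem splitGo_cons (sep cur t : List Char) (accs : List (List Char)) (c : Char) (n : Nat) :
    PySem.Chars.splitOn.go sep (n + 1) (c :: t) cur accs
      = if sep.isPrefixOf (c :: t)
        then PySem.Chars.splitOn.go sep n (List.drop sep.length (c :: t)) [] (cur.reverse :: accs)
        else PySem.Chars.splitOn.go sep n t (c :: cur) accs := by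
  rw [PySem.Chars.splitOn.go]

-- prepend x to the first piece (the way splitOn.go's 'cur' merges into the first produced piece)
def consHead (x : List Char) : List (List Char) → List (List Char)
  | [] => [x]
  | p :: r => (x ++ p) :: r

theorem consHead_consHead (x y : List Char) (G : List (List Char)) :
    consHead x (consHead y G) = consHead (x ++ y) G := by
  cases G <;> simp [consHead]

theorem join_consHead_nil (new : List Char) (G : List (List Char)) :
    PySem.Chars.join new (consHead [] G) = PySem.Chars.join new G := by
  cases G <;> simp [consHead, PySem.Chars.join, List.intercalate]

theorem join_consHead_cons (new x : List Char) (c : Char) (G : List (List Char)) :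
    PySem.Chars.join new (consHead (c :: x) G)
      = c :: PySem.Chars.join new (consHead x G) := by
  cases G with
  | nil => simp [consHead, PySem.Chars.join, List.intercalate]
  | cons p r =>
    cases r <;> simp [consHead, PySem.Chars.join, List.intercalate]

theorem join_cons_nil_consHead (new : List Char) (G : List (List Char)) :
    PySem.Chars.join new ([] :: consHead [] G) = new ++ PySem.Chars.join new G := by
  cases G with
  | nil => simp [consHead, PySem.Chars.join, List.intercalate, List.intersperse]
  | cons p r =>
    cases r <;> simp [consHead, PySem.Chars.join, List.intercalate, List.intersperse]

-- replace.go's accumulator is just reversed output already produced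
theorem repGo_acc (old new : List Char) (fuel : Nat) :
    ∀ (l acc : List Char),
      PySem.Chars.replace.go old new fuel l acc
        = acc.reverse ++ PySem.Chars.replace.go old new fuel l [] := by
  induction fuel with
  | zero => intro l acc; simp [repGo_zero]
  | succ n ih =>
    intro l acc
    cases l with
    | nil => simp [repGo_nil]
    | cons c t =>
      rw [repGo_cons, repGo_cons]
      by_cases h : old.isPrefixOf (c :: t) = true
      · simp only [h, if_true]
        rw [ih _ (new.reverse ++ acc), ih _ (new.reverse ++ [])]
        simp
      · simp only [eq_false_of_ne_true h, Bool.false_eq_true, if_false]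
        rw [ih t (c :: acc), ih t (c :: [])]
        simp

-- splitOn.go's accumulators: finished pieces are prepended reversed, cur merges into the first new piece
theorem splitGo_eq (sep : List Char) (fuel : Nat) :
    ∀ (l cur : List Char) (accs : List (List Char)),
      PySem.Chars.splitOn.go sep fuel l cur accs
        = accs.reverse ++ consHead cur.reverse (PySem.Chars.splitOn.go sep fuel l [] []) := by
  induction fuel with
  | zero => intro l cur accs; simp [splitGo_zero, consHead]
  | succ n ih =>
    intro l cur accs
    cases l with
    | nil => simp [splitGo_nil, consHead]
    | cons c t =>
      rw [splitGo_cons, splitGo_cons]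
      by_cases h : sep.isPrefixOf (c :: t) = true
      · simp only [h, if_true]
        rw [ih _ [] (cur.reverse :: accs), ih _ [] ([].reverse :: [])]
        simp [consHead]
      · simp only [eq_false_of_ne_true h, Bool.false_eq_true, if_false]
        rw [ih t (c :: cur) accs, ih t (c :: []) []]
        simp only [List.reverse_cons, List.reverse_nil, List.nil_append, consHead_consHead]

-- core: one str.replace pass equals split + join, robust in both fuel parameters
theorem repGo_eq_join_splitGo (old new : List Char) (hold : old ≠ []) :
    ∀ (f1 : Nat) (l : List Char) (f2 : Nat), l.length ≤ f1 → l.length ≤ f2 →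
      PySem.Chars.replace.go old new f1 l []
        = PySem.Chars.join new (PySem.Chars.splitOn.go old f2 l [] []) := by
  intro f1
  induction f1 with
  | zero =>
    intro l f2 h1 _
    have hl : l = [] := by cases l <;> simp_all
    subst hl
    cases f2 with
    | zero => simp [repGo_zero, splitGo_zero, PySem.Chars.join, List.intercalate]
    | succ m => simp [repGo_zero, splitGo_nil, PySem.Chars.join, List.intercalate]
  | succ n ih =>
    intro l f2 h1 h2
    cases l with
    | nil =>
      cases f2 with
      | zero => simp [repGo_nil, splitGo_zero, PySem.Chars.join, List.intercalate]
      | succ m => simp [repGo_nil, splitGo_nil, PySem.Chars.join, List.intercalate]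
    | cons c t =>
      cases f2 with
      | zero => simp at h2
      | succ m =>
        rw [repGo_cons, splitGo_cons]
        have hlen : 0 < old.length := List.length_pos_of_ne_nil hold
        by_cases h : old.isPrefixOf (c :: t) = true
        · simp only [h, if_true]
          have hdrop : (List.drop old.length (c :: t)).length ≤ n := by
            simp only [List.length_drop, List.length_cons]
            simp only [List.length_cons] at h1
            omega
          have hdrop2 : (List.drop old.length (c :: t)).length ≤ m := by
            simp only [List.length_drop, List.length_cons]
            simp only [List.length_cons] at h2
            omega
          rw [repGo_acc, splitGo_eq, ih _ m hdrop hdrop2]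
          simp only [List.append_nil, List.reverse_reverse, List.reverse_nil,
            List.reverse_singleton, List.singleton_append]
          rw [join_cons_nil_consHead]
        · simp only [eq_false_of_ne_true h, Bool.false_eq_true, if_false]
          have ht : t.length ≤ n := by simp only [List.length_cons] at h1; omega
          have ht2 : t.length ≤ m := by simp only [List.length_cons] at h2; omega
          rw [repGo_acc, splitGo_eq, ih t m ht ht2]
          simp only [List.reverse_nil, List.nil_append, List.reverse_singleton]
          rw [join_consHead_cons new [] c, join_consHead_nil]
          simp

theorem replace_eq_join_splitOn (s old new : List Char) (hold : old ≠ []) :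
    PySem.Chars.replace s old new = PySem.Chars.join new (PySem.Chars.splitOn s old) := by
  rw [PySem.Chars.replace, PySem.Chars.splitOn]
  have hne : old.isEmpty = false := by cases old <;> simp_all
  rw [hne]
  simp only [Bool.false_eq_true, if_false]
  exact repGo_eq_join_splitGo old new hold s.length s (s.length + 1) (le_refl _) (by omega)

-- the fold of Str.replace over the pairs equals B's recursion of join ∘ splitOn
theorem chain_eq (ps : List (String × String)) (h : ∀ p ∈ ps, p.1.toList ≠ []) :
    ∀ s : String,
      (ps.foldl (fun sanitized p => PySem.Str.replace sanitized p.1 p.2) s).toList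
        = sbApplyFrom (ps.map (fun p => (p.1.toList, p.2.toList))) s.toList := by
  induction ps with
  | nil => intro s; simp [sbApplyFrom]
  | cons p rest ih =>
    intro s
    simp only [List.foldl_cons, List.map_cons, sbApplyFrom]
    have hk : p.1.toList ≠ [] := h p (by simp)
    rw [ih (fun q hq => h q (by simp [hq]))]
    congr 1
    rw [PySem.Str.toList_replace, replace_eq_join_splitOn _ _ _ hk]

-- ===== VERDICT (by name: the statement is the Claim_ definition above) =====
theorem sanitize_audience_description_py_spec : Claim_equal_sanitize_audience_description_py := by
  intro audience _
  unfold Spec_sanitize_audience_description_py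
  unfold sanitize_audience_description_py sanitize_audience_description_py_alt
  apply String.toList_injective
  rw [chain_eq saReplacements (by decide)]
  simp only [String.toList_ofList]
  have hmap : saReplacements.map (fun p => (p.1.toList, p.2.toList)) = sbPairs := by decide
  rw [hmap]
  congr 1
  exact PySem.Str.toList_lower audience
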